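-- pv_equiv track=rewrite | github.com/Atharva-Rajan-Kale/dlc-automation | steps_3_4.py | _contains_autogluon_install
-- ===== SOURCE A (Python) =====
-- def _contains_autogluon_install(lines, start_index):
--     """Check if a RUN block contains autogluon installation"""
--     i = start_index
--     while i < len(lines):
--         line = lines[i].strip()
--         if 'autogluon==${AUTOGLUON_VERSION}' in line or 'autogluon==' in line:
--             return True
--         # If we hit a line that doesn't continue the RUN command, stop looking
--         if line and not line.startswith('&&') and not line.endswith('\\') and not line.startswith('#') and i > start_index:
--             break
--         i += 1
--     return False
-- ===== SOURCE B (Python) =====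
-- def _contains_autogluon_install(lines, start_index):
--     """Check if a RUN block contains autogluon installation.
--
--     Two staged passes: first find the index of the RUN block's last line
--     (the first non-continuing line strictly after start_index, or the end
--     of the file), then test the block's lines for 'autogluon=='.
--     """
--     n = len(lines)
--     if start_index >= n:
--         return False
--     end = n - 1
--     for j in range(start_index + 1, n):
--         s = lines[j].strip()
--         if s and not s.startswith('&&') and not s.endswith('\\') and not s.startswith('#'):
--             end = j
--             break
--     return any('autogluon==' in lines[j].strip() for j in range(start_index, end + 1))
-- ===== Notes on version B (the rewrite author's own statement) =====
-- stated objective: alternative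
-- what changed: B replaces A's single match-or-break scanning loop by two staged passes: pass 1 finds the index of the block's last line (first non-continuing line strictly after start_index, else the last line of the file), pass 2 tests the block's index range for 'autogluon==' with any(), dropping A's redundant 'autogluon==${AUTOGLUON_VERSION}' test (subsumed by 'autogluon==').
import Mathlib
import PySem

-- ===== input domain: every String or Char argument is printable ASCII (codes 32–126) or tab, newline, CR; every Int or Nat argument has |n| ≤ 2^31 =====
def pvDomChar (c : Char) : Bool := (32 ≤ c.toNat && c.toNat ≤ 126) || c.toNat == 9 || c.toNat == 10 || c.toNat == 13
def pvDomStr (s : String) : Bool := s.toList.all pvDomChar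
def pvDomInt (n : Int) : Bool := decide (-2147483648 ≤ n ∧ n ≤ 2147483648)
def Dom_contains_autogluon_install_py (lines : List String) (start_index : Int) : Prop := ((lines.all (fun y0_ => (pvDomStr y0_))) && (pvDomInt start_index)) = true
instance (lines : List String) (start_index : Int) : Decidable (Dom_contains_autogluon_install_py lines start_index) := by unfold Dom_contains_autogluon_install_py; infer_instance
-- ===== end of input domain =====

-- B replaces A's match-or-break scanning loop by two staged passes (find the block's
-- end index, then an any() over the block's index range); alternative decomposition, same cost.

-- ===== PORT A =====
-- A's while loop as recursion on i (i strictly increases towards len(lines))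
def containsAgGoA (lines : List String) (start_index : Int) (i : Int) : Bool :=
  if _h : i < (lines.length : Int) then
    match PySem.List.pyGet? lines i with
    | none => false  -- lines[i] raises IndexError; excluded by Pre_
    | some s =>
      let line := PySem.Str.strip s
      if PySem.Str.isIn "autogluon==${AUTOGLUON_VERSION}" line || PySem.Str.isIn "autogluon==" line then
        true
      else if (line != "") && !(PySem.Str.startswith line "&&") && !(PySem.Str.endswith line "\\")
              && !(PySem.Str.startswith line "#") && decide (i > start_index) then
        false  -- break, then 'return False'
      else
        containsAgGoA lines start_index (i + 1)
  else false
termination_by ((lines.length : Int) - i).toNat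
decreasing_by omega

def contains_autogluon_install_py (lines : List String) (start_index : Int) : Bool :=
  containsAgGoA lines start_index start_index

-- ===== PORT B =====
-- pass 2's generator-expression body: 'autogluon==' in lines[j].strip()
def agMatch (lines : List String) (j : Int) : Bool :=
  match PySem.List.pyGet? lines j with
  | none => false  -- lines[j] raises IndexError; excluded by Pre_
  | some ls => PySem.Str.isIn "autogluon==" (PySem.Str.strip ls)

-- pass 1: 'for j in range(start_index+1, n): if <non-continuing>: end = j; break'
-- as structural recursion over the range list; dflt is the loop's fallthrough value n-1.
def agFindEnd (lines : List String) (dflt : Int) : List Int → Int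
  | [] => dflt
  | j :: js =>
    match PySem.List.pyGet? lines j with
    | none => dflt  -- lines[j] raises IndexError; excluded by Pre_
    | some ls =>
      let s := PySem.Str.strip ls
      if (s != "") && !(PySem.Str.startswith s "&&") && !(PySem.Str.endswith s "\\")
           && !(PySem.Str.startswith s "#") then j
      else agFindEnd lines dflt js

def contains_autogluon_install_py_alt (lines : List String) (start_index : Int) : Bool :=
  let n : Int := (lines.length : Int)
  if start_index ≥ n then false
  else
    let e := agFindEnd lines (n - 1) (PySem.List.pyRange (start_index + 1) n 1)
    (PySem.List.pyRange start_index (e + 1) 1).any (agMatch lines)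

-- ===== PRECONDITION & SPEC =====
-- Pre_ excludes exactly the inputs where A raises IndexError (start_index below -len(lines)).
def Pre_contains_autogluon_install_py (lines : List String) (start_index : Int) : Prop :=
  -(lines.length : Int) ≤ start_index
instance (lines : List String) (start_index : Int) : Decidable (Pre_contains_autogluon_install_py lines start_index) := by unfold Pre_contains_autogluon_install_py; infer_instance

def pvWitness_contains_autogluon_install_py : List String × Int :=
  (["RUN pip install \\", "    autogluon==${AUTOGLUON_VERSION} \\", "    && true"], 0)

def Spec_contains_autogluon_install_py (lines : List String) (start_index : Int) (out : Bool) : Prop := out = contains_autogluon_install_py_alt lines start_index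
instance (lines : List String) (start_index : Int) (out : Bool) : Decidable (Spec_contains_autogluon_install_py lines start_index out) := by unfold Spec_contains_autogluon_install_py; infer_instance

-- ===== CLAIM (what is proved, stated in full; the proofs are below) =====
def Claim_equal_contains_autogluon_install_py : Prop := ∀ (lines : List String) (start_index : Int), Dom_contains_autogluon_install_py lines start_index → Pre_contains_autogluon_install_py lines start_index → Spec_contains_autogluon_install_py lines start_index (contains_autogluon_install_py lines start_index)

-- ===== LEMMAS AND PROOFS =====

-- 'autogluon==' occurs in any string in which 'autogluon==${AUTOGLUON_VERSION}' occurs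
theorem isIn_ag_of_isIn_long (cs : List Char)
    (h : PySem.Chars.isIn "autogluon==${AUTOGLUON_VERSION}".toList cs = true) :
    PySem.Chars.isIn "autogluon==".toList cs = true := by
  rw [PySem.Chars.isIn_iff_infix] at h ⊢
  exact (List.IsPrefix.isInfix (by decide :
    "autogluon==".toList <+: "autogluon==${AUTOGLUON_VERSION}".toList)).trans h

-- in-range indices never make lines[i] raise
theorem pyGet_some_of_inrange (lines : List String) (i : Int)
    (h1 : -(lines.length : Int) ≤ i) (h2 : i < (lines.length : Int)) :
    ∃ s, PySem.List.pyGet? lines i = some s := by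
  cases hg : PySem.List.pyGet? lines i with
  | none =>
    exact absurd ((PySem.List.pyGet?_eq_none_iff lines i).mp hg)
      (by simp only [PySem.Raise.InRange, not_not]; exact ⟨h1, h2⟩)
  | some s => exact ⟨s, rfl⟩

-- A's match test at index j equals B's agMatch (the long needle is subsumed by the short one)
theorem matchA_eq_agMatch (lines : List String) (j : Int) (s : String)
    (hs : PySem.List.pyGet? lines j = some s) :
    (PySem.Str.isIn "autogluon==${AUTOGLUON_VERSION}" (PySem.Str.strip s)
      || PySem.Str.isIn "autogluon==" (PySem.Str.strip s)) = agMatch lines j := by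
  unfold agMatch
  rw [hs]
  cases hl : PySem.Str.isIn "autogluon==" (PySem.Str.strip s) with
  | true => simp_all [PySem.Str.isIn_eq]
  | false =>
    cases hv : PySem.Str.isIn "autogluon==${AUTOGLUON_VERSION}" (PySem.Str.strip s) with
    | false => simp_all [PySem.Str.isIn_eq]
    | true =>
      rw [PySem.Str.isIn_eq] at hv
      have h2 := isIn_ag_of_isIn_long _ hv
      simp_all [PySem.Str.isIn_eq]

-- the end index found by pass 1 starting at i is at least i - 1
theorem agFindEnd_ge (lines : List String) (b : Int) :
    ∀ i, i ≤ b → i - 1 ≤ agFindEnd lines (b - 1) (PySem.List.pyRange i b 1) := by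
  intro i hib
  by_cases h : i < b
  · rw [PySem.List.pyRange_one_cons h]
    unfold agFindEnd
    cases hg : PySem.List.pyGet? lines i with
    | none => dsimp only; omega
    | some s =>
      dsimp only
      split
      · omega
      · have := agFindEnd_ge lines b (i + 1) (by omega)
        omega
  · rw [PySem.List.pyRange_one_eq_nil (by omega)]; unfold agFindEnd; omega
termination_by i => (b - i).toNat
decreasing_by omega

-- main loop correspondence, for indices i strictly past start_index
theorem loopA_eq_B (lines : List String) (start_index : Int)
    (hpre : -(lines.length : Int) ≤ start_index) :
    ∀ i, start_index < i →
    containsAgGoA lines start_index i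
      = (PySem.List.pyRange i
          (agFindEnd lines ((lines.length : Int) - 1) (PySem.List.pyRange i (lines.length : Int) 1) + 1) 1).any
          (agMatch lines) := by
  intro i hi
  by_cases h : i < (lines.length : Int)
  · -- lines[i] is in range: -len ≤ start_index < i < len
    obtain ⟨s, hs⟩ := pyGet_some_of_inrange lines i (by omega) h
    rw [containsAgGoA, dif_pos h, hs]
    simp only [decide_eq_true (show i > start_index from hi), Bool.and_true]
    rw [PySem.List.pyRange_one_cons h]
    unfold agFindEnd
    rw [hs]
    simp only
    by_cases hm : (PySem.Str.isIn "autogluon==${AUTOGLUON_VERSION}" (PySem.Str.strip s)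
      || PySem.Str.isIn "autogluon==" (PySem.Str.strip s)) = true
    · -- A returns true; B's range starts at i and agMatch lines i = true
      rw [if_pos hm]
      have hmi : agMatch lines i = true := (matchA_eq_agMatch lines i s hs) ▸ hm
      split
      · -- terminator at i: end = i, B's range = [i]
        rw [PySem.List.pyRange_one_cons (by omega), PySem.List.pyRange_one_eq_nil (by omega)]
        rw [List.any_cons, hmi]
        simp
      · -- end ≥ i: B's range starts with i
        have he := agFindEnd_ge lines (lines.length : Int) (i + 1) (by omega)
        rw [PySem.List.pyRange_one_cons (by omega)]
        rw [List.any_cons, hmi]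
        simp
    · rw [if_neg hm]
      have hmi : agMatch lines i = false := by
        have := matchA_eq_agMatch lines i s hs
        rw [← this]; simpa using hm
      by_cases ht : ((PySem.Str.strip s != "") && !(PySem.Str.startswith (PySem.Str.strip s) "&&")
          && !(PySem.Str.endswith (PySem.Str.strip s) "\\")
          && !(PySem.Str.startswith (PySem.Str.strip s) "#")) = true
      · -- break in A; terminator found in B's pass 1: end = i, B's range = [i]
        rw [if_pos ht, if_pos ht]
        rw [PySem.List.pyRange_one_cons (by omega), PySem.List.pyRange_one_eq_nil (by omega)]
        rw [List.any_cons, hmi]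
        simp
      · -- continue: both sides recurse to i+1
        rw [if_neg ht, if_neg ht]
        have he := agFindEnd_ge lines (lines.length : Int) (i + 1) (by omega)
        rw [PySem.List.pyRange_one_cons (show i < agFindEnd lines ((lines.length : Int) - 1)
              (PySem.List.pyRange (i + 1) (lines.length : Int) 1) + 1 by omega)]
        rw [List.any_cons, hmi]
        rw [Bool.false_or]
        exact loopA_eq_B lines start_index hpre (i + 1) (by omega)
  · -- i ≥ len: A returns false, B's range is empty (end = len - 1 < i)
    rw [containsAgGoA, dif_neg h]
    rw [PySem.List.pyRange_one_eq_nil (show (lines.length : Int) ≤ i by omega)]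
    unfold agFindEnd
    rw [PySem.List.pyRange_one_eq_nil (by omega)]
    simp
termination_by i => ((lines.length : Int) - i).toNat
decreasing_by omega

-- ===== VERDICT (by name: the statement is the Claim_ definition above) =====
theorem contains_autogluon_install_py_spec : Claim_equal_contains_autogluon_install_py := by
  intro lines start_index _hdom hpre
  unfold Spec_contains_autogluon_install_py contains_autogluon_install_py contains_autogluon_install_py_alt
  simp only
  by_cases h0 : start_index ≥ (lines.length : Int)
  · rw [if_pos h0, containsAgGoA, dif_neg (by omega)]
  · rw [if_neg h0]
    -- first iteration of A (i = start_index, the break is disabled since i > start_index fails)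
    obtain ⟨s, hs⟩ := pyGet_some_of_inrange lines start_index hpre (by omega)
    rw [containsAgGoA, dif_pos (by omega), hs]
    simp only
    have he := agFindEnd_ge lines (lines.length : Int) (start_index + 1) (by omega)
    rw [PySem.List.pyRange_one_cons (show start_index < agFindEnd lines ((lines.length : Int) - 1)
          (PySem.List.pyRange (start_index + 1) (lines.length : Int) 1) + 1 by omega)]
    rw [List.any_cons]
    by_cases hm : (PySem.Str.isIn "autogluon==${AUTOGLUON_VERSION}" (PySem.Str.strip s)
      || PySem.Str.isIn "autogluon==" (PySem.Str.strip s)) = true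
    · rw [if_pos hm]
      have hmi : agMatch lines start_index = true := (matchA_eq_agMatch lines start_index s hs) ▸ hm
      rw [hmi]; simp
    · rw [if_neg hm]
      have hmi : agMatch lines start_index = false := by
        have := matchA_eq_agMatch lines start_index s hs
        rw [← this]; simpa using hm
      rw [if_neg (by simp)]
      rw [hmi, Bool.false_or]
      exact loopA_eq_B lines start_index hpre (start_index + 1) (by omega)
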